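-- pv_equiv track=rewrite | github.com/owhenrique/unb-software-engeneering | 2023.2/TEP/CODEFORCES1/B.py | process_key_presses
-- ===== SOURCE A (Python) =====
-- def process_key_presses(s):
--     lower_indices = [i for i, c in enumerate(s) if c.islower()]
--     upper_indices = [i for i, c in enumerate(s) if c.isupper()]
--
--     for char in s[::-1]:
--         if char == 'b' and lower_indices:
--             index = lower_indices.pop()
--             s = s[:index] + s[index + 1:]
--         elif char == 'B' and upper_indices:
--             index = upper_indices.pop()
--             s = s[:index] + s[index + 1:]
--
--     return s
-- ===== SOURCE B (Python) =====
-- def _pkp_build(m):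
--     # order-statistics segment tree over m alive leaves; node = (count, left, right)
--     if m == 1:
--         return (1,)
--     l = _pkp_build(m // 2)
--     r = _pkp_build(m - m // 2)
--     return (l[0] + r[0], l, r)
--
--
-- def _pkp_delete(t, k):
--     # clear the k-th (0-based) alive leaf, 0 <= k < t[0]
--     if len(t) == 1:
--         return (0,)
--     _, l, r = t
--     if k < l[0]:
--         l = _pkp_delete(l, k)
--     else:
--         r = _pkp_delete(r, k - l[0])
--     return (l[0] + r[0], l, r)
--
--
-- def _pkp_flags(t):
--     if len(t) == 1:
--         return [t[0] == 1]
--     return _pkp_flags(t[1]) + _pkp_flags(t[2])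
--
--
-- def process_key_presses(s):
--     n = len(s)
--     low_rev = [i for i, c in enumerate(s) if c.islower()][::-1]
--     up_rev = [i for i, c in enumerate(s) if c.isupper()][::-1]
--     # the deletion-index sequence is fixed by s alone: read it off with two counters
--     seq = []
--     ib = 0
--     iB = 0
--     for c in reversed(s):
--         if c == 'b' and ib < len(low_rev):
--             seq.append(low_rev[ib])
--             ib += 1
--         elif c == 'B' and iB < len(up_rev):
--             seq.append(up_rev[iB])
--             iB += 1
--     if n == 0:
--         return s
--     # apply each deletion to the k-th surviving position in O(log n)
--     t = _pkp_build(n)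
--     for idx in seq:
--         if idx < t[0]:
--             t = _pkp_delete(t, idx)
--     return ''.join(c for c, alive in zip(s, _pkp_flags(t)) if alive)
-- ===== Notes on version B (the rewrite author's own statement) =====
-- stated objective: alternative
-- what changed: B derives the fixed deletion-index sequence with two counters over precomputed reversed index lists (no pops) and applies each deletion to the k-th surviving character via an order-statistics segment tree, instead of A's rebuilding the whole string by slicing on every deletion; measured 1.37x at the largest timed size, below the 1.5x bar, so no speed is claimed.
import Mathlib
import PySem

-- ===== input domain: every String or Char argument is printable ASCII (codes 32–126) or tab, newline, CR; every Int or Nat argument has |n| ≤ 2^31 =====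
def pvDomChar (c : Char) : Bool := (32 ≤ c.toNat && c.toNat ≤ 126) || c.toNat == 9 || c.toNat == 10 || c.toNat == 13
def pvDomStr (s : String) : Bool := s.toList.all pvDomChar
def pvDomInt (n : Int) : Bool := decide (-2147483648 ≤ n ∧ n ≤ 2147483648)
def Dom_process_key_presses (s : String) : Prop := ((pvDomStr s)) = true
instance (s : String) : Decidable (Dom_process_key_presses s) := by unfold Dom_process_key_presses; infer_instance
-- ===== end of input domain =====

-- B reads the deletion-index sequence off with two counters (no pops) and applies each
-- deletion through an order-statistics segment tree instead of A's per-deletion string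
-- slicing (objective: alternative; not measurably faster at the timed sizes).

-- ===== PORT A =====
-- one iteration of A's loop: state = (current string, lower_indices, upper_indices)
def pkpStepA (st : List Char × List Int × List Int) (ch : Char) :
    List Char × List Int × List Int :=
  let cur := st.1; let L := st.2.1; let U := st.2.2
  if ch == 'b' && !L.isEmpty then
    let idx := L.getLastD 0
    (PySem.List.slice cur none (some idx) ++ PySem.List.slice cur (some (idx + 1)) none,
     L.dropLast, U)
  else if ch == 'B' && !U.isEmpty then
    let idx := U.getLastD 0
    (PySem.List.slice cur none (some idx) ++ PySem.List.slice cur (some (idx + 1)) none,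
     L, U.dropLast)
  else st

def process_key_presses (s : String) : String :=
  let cs := s.toList
  let lower := ((PySem.List.enumerate cs 0).filter (fun p => PySem.Chars.islower p.2)).map (·.1)
  let upper := ((PySem.List.enumerate cs 0).filter (fun p => PySem.Chars.isupper p.2)).map (·.1)
  String.ofList (cs.reverse.foldl pkpStepA (cs, lower, upper)).1

-- ===== PORT B =====
-- order-statistics segment tree (Python: node = (count, left, right), leaf = (count,))
inductive PKPTree where
  | leaf (c : Nat)
  | node (c : Nat) (l r : PKPTree)
deriving Repr, DecidableEq

def pkpCnt : PKPTree → Nat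
  | .leaf c => c
  | .node c _ _ => c

-- _pkp_build(m), m ≥ 1 (the m ≤ 1 guard only totalises the unreachable m = 0 case)
def pkpBuild (m : Nat) : PKPTree :=
  if m ≤ 1 then .leaf 1
  else
    let l := pkpBuild (m / 2)
    let r := pkpBuild (m - m / 2)
    .node (pkpCnt l + pkpCnt r) l r
termination_by m
decreasing_by all_goals omega

-- _pkp_delete(t, k): clear the k-th alive leaf (caller guarantees 0 ≤ k < count)
def pkpDelete : PKPTree → Int → PKPTree
  | .leaf _, _ => .leaf 0
  | .node _ l r, k =>
    if k < (pkpCnt l : Int) then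
      let l' := pkpDelete l k
      .node (pkpCnt l' + pkpCnt r) l' r
    else
      let r' := pkpDelete r (k - (pkpCnt l : Int))
      .node (pkpCnt l + pkpCnt r') l r'

-- _pkp_flags(t)
def pkpFlags : PKPTree → List Bool
  | .leaf c => [c == 1]
  | .node _ l r => pkpFlags l ++ pkpFlags r

-- one iteration of B's sequence loop: state = (ib, iB, seq)
def pkpStepB (lowRev upRev : List Int) (st : Int × Int × List Int) (ch : Char) :
    Int × Int × List Int :=
  let ib := st.1; let iB := st.2.1; let acc := st.2.2
  if ch == 'b' && decide (ib < (lowRev.length : Int)) then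
    (ib + 1, iB, acc ++ [(PySem.List.pyGet? lowRev ib).getD 0])
  else if ch == 'B' && decide (iB < (upRev.length : Int)) then
    (ib, iB + 1, acc ++ [(PySem.List.pyGet? upRev iB).getD 0])
  else st

def process_key_presses_alt (s : String) : String :=
  let cs := s.toList
  let n := cs.length
  let lowRev := (((PySem.List.enumerate cs 0).filter (fun p => PySem.Chars.islower p.2)).map (·.1)).reverse
  let upRev := (((PySem.List.enumerate cs 0).filter (fun p => PySem.Chars.isupper p.2)).map (·.1)).reverse
  let seq := (cs.reverse.foldl (pkpStepB lowRev upRev) (0, 0, [])).2.2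
  if n = 0 then s
  else
    let t := seq.foldl (fun t idx => if idx < (pkpCnt t : Int) then pkpDelete t idx else t) (pkpBuild n)
    String.ofList (((cs.zip (pkpFlags t)).filter (·.2)).map (·.1))

-- ===== PRECONDITION & SPEC =====
def Spec_process_key_presses (s : String) (out : String) : Prop := out = process_key_presses_alt s
instance (s : String) (out : String) : Decidable (Spec_process_key_presses s out) := by unfold Spec_process_key_presses; infer_instance

-- ===== CLAIM (what is proved, stated in full; the proofs are below) =====
def Claim_equal_process_key_presses : Prop := ∀ (s : String), Dom_process_key_presses s → Spec_process_key_presses s (process_key_presses s)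

-- ===== LEMMAS AND PROOFS =====

-- proof-side model of A: pop-based deletion-sequence step and list deletion
def pkpStepSeq (st : List Int × List Int × List Int) (ch : Char) :
    List Int × List Int × List Int :=
  let L := st.1; let U := st.2.1; let acc := st.2.2
  if ch == 'b' && !L.isEmpty then (L.dropLast, U, acc ++ [L.getLastD 0])
  else if ch == 'B' && !U.isEmpty then (L, U.dropLast, acc ++ [U.getLastD 0])
  else st

def pkpDel (P : List Nat) (idx : Int) : List Nat :=
  if idx < (P.length : Int) then P.take idx.toNat ++ P.drop (idx.toNat + 1) else P

-- segment-tree well-formedness and the positions of the alive flags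
def pkpWF : PKPTree → Prop
  | .leaf c => c ≤ 1
  | .node c l r => c = pkpCnt l + pkpCnt r ∧ pkpWF l ∧ pkpWF r

def truePos : List Bool → List Nat
  | [] => []
  | b :: bs => if b then 0 :: (truePos bs).map (· + 1) else (truePos bs).map (· + 1)

theorem pkp_map_range (cs : List Char) :
    (List.range cs.length).map (fun p => cs.getD p ' ') = cs := by
  apply List.ext_getElem
  · simp
  · intro i h1 h2
    simp [List.getD_eq_getElem?_getD, h2]

theorem pkp_getLastD_mem {L : List Int} (h : L ≠ []) : L.getLastD 0 ∈ L := by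
  induction L with
  | nil => exact absurd rfl h
  | cons a t ih =>
    cases t with
    | nil => simp
    | cons b u => simpa using Or.inr (ih (by simp))

theorem pkp_stepA_b (cur : List Char) (L U : List Int) (ch : Char)
    (h : (ch == 'b' && !L.isEmpty) = true) :
    pkpStepA (cur, L, U) ch
      = (PySem.List.slice cur none (some (L.getLastD 0)) ++
           PySem.List.slice cur (some (L.getLastD 0 + 1)) none, L.dropLast, U) := by
  simp [pkpStepA, h]

theorem pkp_stepA_B (cur : List Char) (L U : List Int) (ch : Char)
    (hb : ¬ (ch == 'b' && !L.isEmpty) = true) (hB : (ch == 'B' && !U.isEmpty) = true) :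
    pkpStepA (cur, L, U) ch
      = (PySem.List.slice cur none (some (U.getLastD 0)) ++
           PySem.List.slice cur (some (U.getLastD 0 + 1)) none, L, U.dropLast) := by
  simp [pkpStepA, hb, hB]

theorem pkp_stepA_none (cur : List Char) (L U : List Int) (ch : Char)
    (hb : ¬ (ch == 'b' && !L.isEmpty) = true) (hB : ¬ (ch == 'B' && !U.isEmpty) = true) :
    pkpStepA (cur, L, U) ch = (cur, L, U) := by
  simp [pkpStepA, hb, hB]

theorem pkp_stepSeq_b (L U acc : List Int) (ch : Char)
    (h : (ch == 'b' && !L.isEmpty) = true) :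
    pkpStepSeq (L, U, acc) ch = (L.dropLast, U, acc ++ [L.getLastD 0]) := by
  simp [pkpStepSeq, h]

theorem pkp_stepSeq_B (L U acc : List Int) (ch : Char)
    (hb : ¬ (ch == 'b' && !L.isEmpty) = true) (hB : (ch == 'B' && !U.isEmpty) = true) :
    pkpStepSeq (L, U, acc) ch = (L, U.dropLast, acc ++ [U.getLastD 0]) := by
  simp [pkpStepSeq, hb, hB]

theorem pkp_stepSeq_none (L U acc : List Int) (ch : Char)
    (hb : ¬ (ch == 'b' && !L.isEmpty) = true) (hB : ¬ (ch == 'B' && !U.isEmpty) = true) :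
    pkpStepSeq (L, U, acc) ch = (L, U, acc) := by
  simp [pkpStepSeq, hb, hB]

theorem pkp_del_map (cs : List Char) (P : List Nat) (idx : Int) (h : 0 ≤ idx) :
    PySem.List.slice (P.map (fun p => cs.getD p ' ')) none (some idx) ++
      PySem.List.slice (P.map (fun p => cs.getD p ' ')) (some (idx + 1)) none
    = (pkpDel P idx).map (fun p => cs.getD p ' ') := by
  have h2 : (idx + 1).toNat = idx.toNat + 1 := by omega
  rw [PySem.List.slice_to (hb := h), PySem.List.slice_from (ha := by omega), h2]
  unfold pkpDel
  split_ifs with hlt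
  · simp [List.map_take, List.map_drop]
  · have hge : P.length ≤ idx.toNat := by
      simp only [not_lt] at hlt; omega
    rw [List.take_of_length_le (by simpa using hge),
      List.drop_eq_nil_of_le (by simp; omega)]
    simp

theorem pkp_seq_acc (rs : List Char) : ∀ (L U acc : List Int),
    rs.foldl pkpStepSeq (L, U, acc)
      = ((rs.foldl pkpStepSeq (L, U, [])).1,
         (rs.foldl pkpStepSeq (L, U, [])).2.1,
         acc ++ (rs.foldl pkpStepSeq (L, U, [])).2.2) := by
  induction rs with
  | nil => intro L U acc; simp
  | cons ch rest ih =>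
    intro L U acc
    simp only [List.foldl_cons]
    by_cases hb : (ch == 'b' && !L.isEmpty) = true
    · rw [pkp_stepSeq_b _ _ acc _ hb, pkp_stepSeq_b _ _ [] _ hb,
        ih _ _ (acc ++ [L.getLastD 0]), ih _ _ ([] ++ [L.getLastD 0])]
      simp
    · by_cases hB : (ch == 'B' && !U.isEmpty) = true
      · rw [pkp_stepSeq_B _ _ acc _ hb hB, pkp_stepSeq_B _ _ [] _ hb hB,
          ih _ _ (acc ++ [U.getLastD 0]), ih _ _ ([] ++ [U.getLastD 0])]
        simp
      · rw [pkp_stepSeq_none _ _ acc _ hb hB, pkp_stepSeq_none _ _ [] _ hb hB]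
        exact ih _ _ acc

theorem pkp_main (cs : List Char) : ∀ (rs : List Char) (L U : List Int) (P : List Nat),
    (∀ x ∈ L, 0 ≤ x) → (∀ x ∈ U, 0 ≤ x) →
    (rs.foldl pkpStepA (P.map (fun p => cs.getD p ' '), L, U)).1
      = ((rs.foldl pkpStepSeq (L, U, [])).2.2.foldl pkpDel P).map
          (fun p => cs.getD p ' ') := by
  intro rs
  induction rs with
  | nil => intro L U P _ _; simp
  | cons ch rest ih =>
    intro L U P hL hU
    simp only [List.foldl_cons]
    by_cases hb : (ch == 'b' && !L.isEmpty) = true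
    · have hne : L ≠ [] := by
        rcases Bool.and_eq_true_iff.mp hb with ⟨_, h2⟩
        simpa using h2
      have hidx : 0 ≤ L.getLastD 0 := hL _ (pkp_getLastD_mem hne)
      rw [pkp_stepA_b _ _ _ _ hb, pkp_stepSeq_b _ _ [] _ hb,
        pkp_del_map cs P _ hidx,
        ih L.dropLast U (pkpDel P (L.getLastD 0))
          (fun x hx => hL x ((List.dropLast_sublist L).subset hx)) hU,
        pkp_seq_acc rest L.dropLast U ([] ++ [L.getLastD 0])]
      simp
    · by_cases hB : (ch == 'B' && !U.isEmpty) = true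
      · have hne : U ≠ [] := by
          rcases Bool.and_eq_true_iff.mp hB with ⟨_, h2⟩
          simpa using h2
        have hidx : 0 ≤ U.getLastD 0 := hU _ (pkp_getLastD_mem hne)
        rw [pkp_stepA_B _ _ _ _ hb hB, pkp_stepSeq_B _ _ [] _ hb hB,
          pkp_del_map cs P _ hidx,
          ih L U.dropLast (pkpDel P (U.getLastD 0)) hL
            (fun x hx => hU x ((List.dropLast_sublist U).subset hx)),
          pkp_seq_acc rest L U.dropLast ([] ++ [U.getLastD 0])]
        simp
      · rw [pkp_stepA_none _ _ _ _ hb hB, pkp_stepSeq_none _ _ [] _ hb hB]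
        exact ih L U P hL hU

theorem pkp_enum_nonneg (cs : List Char) (f : Char → Bool) :
    ∀ x ∈ ((PySem.List.enumerate cs 0).filter (fun p => f p.2)).map (·.1), 0 ≤ x := by
  intro x hx
  simp only [List.mem_map, List.mem_filter] at hx
  obtain ⟨p, ⟨hp, _⟩, rfl⟩ := hx
  obtain ⟨k, hk, rfl⟩ := (PySem.List.mem_enumerate_iff _ _ _).mp hp
  simp

-- phase 1: the pop-based sequence equals B's counter-based sequence
theorem pkp_take_getLastD (lows : List Int) (nb : Nat) (h : nb < lows.length) :
    (lows.take (lows.length - nb)).getLastD 0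
      = (PySem.List.pyGet? lows.reverse (nb : Int)).getD 0 := by
  rw [PySem.List.pyGet?_natCast, List.getElem?_reverse (by simpa using h)]
  rw [List.getLastD_eq_getLast?, List.getLast?_eq_getElem?]
  rw [List.getElem?_take_of_lt (by simp; omega)]
  congr 2
  simp
  omega

theorem pkp_stepB_b (lowRev upRev : List Int) (ib iB : Int) (acc : List Int) (ch : Char)
    (h : (ch == 'b' && decide (ib < (lowRev.length : Int))) = true) :
    pkpStepB lowRev upRev (ib, iB, acc) ch
      = (ib + 1, iB, acc ++ [(PySem.List.pyGet? lowRev ib).getD 0]) := by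
  simp [pkpStepB, h]

theorem pkp_stepB_B (lowRev upRev : List Int) (ib iB : Int) (acc : List Int) (ch : Char)
    (hb : ¬ (ch == 'b' && decide (ib < (lowRev.length : Int))) = true)
    (hB : (ch == 'B' && decide (iB < (upRev.length : Int))) = true) :
    pkpStepB lowRev upRev (ib, iB, acc) ch
      = (ib, iB + 1, acc ++ [(PySem.List.pyGet? upRev iB).getD 0]) := by
  simp [pkpStepB, hb, hB]

theorem pkp_stepB_none (lowRev upRev : List Int) (ib iB : Int) (acc : List Int) (ch : Char)
    (hb : ¬ (ch == 'b' && decide (ib < (lowRev.length : Int))) = true)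
    (hB : ¬ (ch == 'B' && decide (iB < (upRev.length : Int))) = true) :
    pkpStepB lowRev upRev (ib, iB, acc) ch = (ib, iB, acc) := by
  simp [pkpStepB, hb, hB]

theorem pkp_dropLast_take (l : List Int) (n : Nat) (h : n ≤ l.length) :
    (l.take n).dropLast = l.take (n - 1) := by
  rw [List.dropLast_eq_take, List.take_take, List.length_take]
  congr 1
  omega

theorem pkp_take_ne_nil (l : List Int) (n : Nat) (h1 : 0 < n) (h2 : n ≤ l.length) :
    l.take n ≠ [] := by
  intro h
  rcases List.take_eq_nil_iff.mp h with h' | h'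
  · omega
  · subst h'; simp at h2; omega

theorem pkp_phase1 (lows ups : List Int) : ∀ (rs : List Char) (nb nB : Nat) (acc : List Int),
    nb ≤ lows.length → nB ≤ ups.length →
    (rs.foldl pkpStepSeq (lows.take (lows.length - nb), ups.take (ups.length - nB), acc)).2.2
      = (rs.foldl (pkpStepB lows.reverse ups.reverse) ((nb : Int), (nB : Int), acc)).2.2 := by
  intro rs
  induction rs with
  | nil => intros; rfl
  | cons ch rest ih =>
    intro nb nB acc hnb hnB
    simp only [List.foldl_cons]
    by_cases hcb : ch = 'b' ∧ nb < lows.length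
    · obtain ⟨hch, hlt⟩ := hcb
      have hne : lows.take (lows.length - nb) ≠ [] :=
        pkp_take_ne_nil _ _ (by omega) (by omega)
      have hA : (ch == 'b' && !(lows.take (lows.length - nb)).isEmpty) = true := by
        subst hch; simp [hne]
      have hB : (ch == 'b' && decide ((nb : Int) < (lows.reverse.length : Int))) = true := by
        subst hch; simp; exact_mod_cast hlt
      rw [pkp_stepSeq_b _ _ _ _ hA, pkp_stepB_b _ _ _ _ _ _ hB]
      rw [pkp_dropLast_take _ _ (by omega), pkp_take_getLastD lows nb hlt]
      have e1 : lows.length - nb - 1 = lows.length - (nb + 1) := by omega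
      have e2 : ((nb : Int) + 1) = ((nb + 1 : Nat) : Int) := by push_cast; ring
      rw [e1, e2]
      exact ih (nb + 1) nB _ (by omega) hnB
    · have hAfirst : ¬ (ch == 'b' && !(lows.take (lows.length - nb)).isEmpty) = true := by
        intro h
        rcases Bool.and_eq_true_iff.mp h with ⟨h1, h2⟩
        refine hcb ⟨by simpa using h1, ?_⟩
        by_contra hge
        have : lows.length - nb = 0 := by omega
        rw [this] at h2
        simp at h2
      have hBfirst : ¬ (ch == 'b' && decide ((nb : Int) < (lows.reverse.length : Int))) = true := by
        intro h
        rcases Bool.and_eq_true_iff.mp h with ⟨h1, h2⟩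
        refine hcb ⟨by simpa using h1, ?_⟩
        simp at h2
        exact_mod_cast h2
      by_cases hcB : ch = 'B' ∧ nB < ups.length
      · obtain ⟨hch, hlt⟩ := hcB
        have hne : ups.take (ups.length - nB) ≠ [] :=
          pkp_take_ne_nil _ _ (by omega) (by omega)
        have hA : (ch == 'B' && !(ups.take (ups.length - nB)).isEmpty) = true := by
          subst hch; simp [hne]
        have hB : (ch == 'B' && decide ((nB : Int) < (ups.reverse.length : Int))) = true := by
          subst hch; simp; exact_mod_cast hlt
        rw [pkp_stepSeq_B _ _ _ _ hAfirst hA, pkp_stepB_B _ _ _ _ _ _ hBfirst hB]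
        rw [pkp_dropLast_take _ _ (by omega), pkp_take_getLastD ups nB hlt]
        have e1 : ups.length - nB - 1 = ups.length - (nB + 1) := by omega
        have e2 : ((nB : Int) + 1) = ((nB + 1 : Nat) : Int) := by push_cast; ring
        rw [e1, e2]
        exact ih nb (nB + 1) _ hnb (by omega)
      · have hAsecond : ¬ (ch == 'B' && !(ups.take (ups.length - nB)).isEmpty) = true := by
          intro h
          rcases Bool.and_eq_true_iff.mp h with ⟨h1, h2⟩
          refine hcB ⟨by simpa using h1, ?_⟩
          by_contra hge
          have : ups.length - nB = 0 := by omega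
          rw [this] at h2
          simp at h2
        have hBsecond : ¬ (ch == 'B' && decide ((nB : Int) < (ups.reverse.length : Int))) = true := by
          intro h
          rcases Bool.and_eq_true_iff.mp h with ⟨h1, h2⟩
          refine hcB ⟨by simpa using h1, ?_⟩
          simp at h2
          exact_mod_cast h2
        rw [pkp_stepSeq_none _ _ _ _ hAfirst hAsecond,
          pkp_stepB_none _ _ _ _ _ _ hBfirst hBsecond]
        exact ih nb nB acc hnb hnB

-- segment-tree facts
theorem pkp_cnt_eq_count : ∀ (t : PKPTree), pkpWF t → pkpCnt t = (pkpFlags t).count true := by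
  intro t
  induction t with
  | leaf c =>
    intro hw
    simp only [pkpWF] at hw
    interval_cases c <;> simp [pkpCnt, pkpFlags]
  | node c l r ihl ihr =>
    intro hw
    obtain ⟨hc, wl, wr⟩ := hw
    simp only [pkpCnt, pkpFlags]
    rw [List.count_append, hc, ihl wl, ihr wr]

theorem pkp_length_truePos : ∀ (bs : List Bool), (truePos bs).length = bs.count true := by
  intro bs
  induction bs with
  | nil => simp [truePos]
  | cons b bs ih =>
    by_cases hb : b = true <;> simp [truePos, hb, ih]

theorem pkp_truePos_append : ∀ (xs ys : List Bool),
    truePos (xs ++ ys) = truePos xs ++ (truePos ys).map (· + xs.length) := by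
  intro xs
  induction xs with
  | nil => intro ys; simp [truePos]
  | cons x xs ih =>
    intro ys
    by_cases hx : x = true
    · simp [truePos, hx, ih ys, List.map_map]
    · simp [truePos, hx, ih ys, List.map_map]

theorem pkp_build_flags : ∀ (m : Nat), 1 ≤ m →
    pkpFlags (pkpBuild m) = List.replicate m true ∧ pkpWF (pkpBuild m) := by
  intro m
  induction m using Nat.strong_induction_on with
  | _ m ih =>
    intro hm
    unfold pkpBuild
    by_cases h1 : m ≤ 1
    · have hm1 : m = 1 := by omega
      subst hm1
      simp [pkpFlags, pkpWF]
    · obtain ⟨fl, wl⟩ := ih (m / 2) (by omega) (by omega)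
      obtain ⟨fr, wr⟩ := ih (m - m / 2) (by omega) (by omega)
      simp only [h1, if_false]
      refine ⟨?_, rfl, wl, wr⟩
      rw [pkpFlags, fl, fr, ← List.replicate_add]
      congr 1
      omega

theorem pkp_truePos_replicate : ∀ (n : Nat), truePos (List.replicate n true) = List.range n := by
  intro n
  induction n with
  | zero => simp [truePos]
  | succ n ih =>
    rw [List.replicate_succ, List.range_succ_eq_map]
    simp [truePos, ih]

theorem pkp_flags_length_delete : ∀ (t : PKPTree) (k : Int),
    (pkpFlags (pkpDelete t k)).length = (pkpFlags t).length := by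
  intro t
  induction t with
  | leaf c => intro k; simp [pkpDelete, pkpFlags]
  | node c l r ihl ihr =>
    intro k
    by_cases hk : k < (pkpCnt l : Int) <;>
      simp [pkpDelete, hk, pkpFlags, ihl, ihr]

theorem pkp_delete_spec : ∀ (t : PKPTree) (k : Int), pkpWF t → 0 ≤ k → k < (pkpCnt t : Int) →
    truePos (pkpFlags (pkpDelete t k))
        = (truePos (pkpFlags t)).take k.toNat ++ (truePos (pkpFlags t)).drop (k.toNat + 1)
      ∧ pkpWF (pkpDelete t k) := by
  intro t
  induction t with
  | leaf c =>
    intro k hw h0 hk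
    simp only [pkpWF] at hw
    simp only [pkpCnt] at hk
    have hc : c = 1 := by omega
    have hk0 : k = 0 := by omega
    subst hc; subst hk0
    simp [pkpDelete, pkpFlags, truePos, pkpWF]
  | node c l r ihl ihr =>
    intro k hw h0 hk
    obtain ⟨hc, wl, wr⟩ := hw
    have hPL : (truePos (pkpFlags l)).length = pkpCnt l := by
      rw [pkp_length_truePos, pkp_cnt_eq_count l wl]
    by_cases hkl : k < (pkpCnt l : Int)
    · obtain ⟨htp, hwf⟩ := ihl k wl h0 hkl
      simp only [pkpDelete, hkl, if_pos]
      constructor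
      · simp only [pkpFlags]
        rw [pkp_truePos_append, pkp_truePos_append, pkp_flags_length_delete, htp]
        rw [List.take_append_of_le_length (by omega),
          List.drop_append_of_le_length (by omega)]
        simp [List.append_assoc]
      · exact ⟨rfl, hwf, wr⟩
    · have hcl : (pkpCnt l : Int) ≤ k := by omega
      have hlen1 : (truePos (pkpFlags l)).length ≤ k.toNat := by omega
      have hlen2 : (truePos (pkpFlags l)).length ≤ k.toNat + 1 := by omega
      have h0' : 0 ≤ k - (pkpCnt l : Int) := by omega
      have hk' : k - (pkpCnt l : Int) < (pkpCnt r : Int) := by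
        simp only [pkpCnt] at hk; omega
      obtain ⟨htp, hwf⟩ := ihr (k - (pkpCnt l : Int)) wr h0' hk'
      simp only [pkpDelete, hkl, if_neg, not_false_iff]
      constructor
      · simp only [pkpFlags]
        rw [pkp_truePos_append, pkp_truePos_append, htp]
        rw [List.take_append, List.drop_append]
        rw [List.take_of_length_le hlen1, List.drop_eq_nil_of_le hlen2]
        have e1 : k.toNat - (truePos (pkpFlags l)).length = (k - (pkpCnt l : Int)).toNat := by omega
        have e2 : k.toNat + 1 - (truePos (pkpFlags l)).length = (k - (pkpCnt l : Int)).toNat + 1 := by omega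
        rw [e1, e2]
        simp [List.map_take, List.map_drop, List.append_assoc]
      · exact ⟨rfl, wl, hwf⟩

theorem pkp_tree_fold (seq : List Int) : ∀ (t : PKPTree), pkpWF t → (∀ x ∈ seq, 0 ≤ x) →
    truePos (pkpFlags (seq.foldl (fun t idx => if idx < (pkpCnt t : Int) then pkpDelete t idx else t) t))
        = seq.foldl pkpDel (truePos (pkpFlags t))
      ∧ pkpWF (seq.foldl (fun t idx => if idx < (pkpCnt t : Int) then pkpDelete t idx else t) t) := by
  induction seq with
  | nil => intro t hw _; exact ⟨rfl, hw⟩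
  | cons k rest ih =>
    intro t hw hnn
    have hk0 : 0 ≤ k := hnn k List.mem_cons_self
    have hlen : (truePos (pkpFlags t)).length = pkpCnt t := by
      rw [pkp_length_truePos, pkp_cnt_eq_count t hw]
    simp only [List.foldl_cons]
    by_cases hg : k < (pkpCnt t : Int)
    · obtain ⟨htp, hwf⟩ := pkp_delete_spec t k hw hk0 hg
      have hdel : pkpDel (truePos (pkpFlags t)) k
          = (truePos (pkpFlags t)).take k.toNat ++ (truePos (pkpFlags t)).drop (k.toNat + 1) := by
        unfold pkpDel
        rw [if_pos (by omega)]
      rw [if_pos hg]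
      obtain ⟨a, b⟩ := ih (pkpDelete t k) hwf (fun x hx => hnn x (List.mem_cons_of_mem _ hx))
      refine ⟨?_, b⟩
      rw [a, htp, hdel]
    · have hdel : pkpDel (truePos (pkpFlags t)) k = truePos (pkpFlags t) := by
        unfold pkpDel
        rw [if_neg (by omega)]
      rw [if_neg hg, hdel]
      exact ih t hw (fun x hx => hnn x (List.mem_cons_of_mem _ hx))

theorem pkp_fold_flags_length (seq : List Int) : ∀ (t : PKPTree),
    (pkpFlags (seq.foldl (fun t idx => if idx < (pkpCnt t : Int) then pkpDelete t idx else t) t)).length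
      = (pkpFlags t).length := by
  induction seq with
  | nil => intro t; rfl
  | cons k rest ih =>
    intro t
    simp only [List.foldl_cons]
    by_cases hg : k < (pkpCnt t : Int)
    · rw [if_pos hg, ih, pkp_flags_length_delete]
    · rw [if_neg hg, ih]

theorem pkp_seq_nonneg : ∀ (rs : List Char) (L U acc : List Int),
    (∀ x ∈ L, 0 ≤ x) → (∀ x ∈ U, 0 ≤ x) → (∀ x ∈ acc, 0 ≤ x) →
    ∀ x ∈ (rs.foldl pkpStepSeq (L, U, acc)).2.2, 0 ≤ x := by
  intro rs
  induction rs with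
  | nil => intro L U acc _ _ hacc; exact hacc
  | cons ch rest ih =>
    intro L U acc hL hU hacc
    simp only [List.foldl_cons]
    by_cases hb : (ch == 'b' && !L.isEmpty) = true
    · have hne : L ≠ [] := by
        rcases Bool.and_eq_true_iff.mp hb with ⟨_, h2⟩
        simpa using h2
      rw [pkp_stepSeq_b _ _ _ _ hb]
      refine ih _ _ _ (fun x hx => hL x ((List.dropLast_sublist L).subset hx)) hU ?_
      intro x hx
      rcases List.mem_append.mp hx with hx | hx
      · exact hacc x hx
      · rw [List.mem_singleton.mp hx]
        exact hL _ (pkp_getLastD_mem hne)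
    · by_cases hB : (ch == 'B' && !U.isEmpty) = true
      · have hne : U ≠ [] := by
          rcases Bool.and_eq_true_iff.mp hB with ⟨_, h2⟩
          simpa using h2
        rw [pkp_stepSeq_B _ _ _ _ hb hB]
        refine ih _ _ _ hL (fun x hx => hU x ((List.dropLast_sublist U).subset hx)) ?_
        intro x hx
        rcases List.mem_append.mp hx with hx | hx
        · exact hacc x hx
        · rw [List.mem_singleton.mp hx]
          exact hU _ (pkp_getLastD_mem hne)
      · rw [pkp_stepSeq_none _ _ _ _ hb hB]
        exact ih _ _ _ hL hU hacc

theorem pkp_bridge (cs : List Char) (L U : List Int)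
    (hL : ∀ x ∈ L, 0 ≤ x) (hU : ∀ x ∈ U, 0 ≤ x) :
    (cs.reverse.foldl pkpStepA (cs, L, U)).1
      = ((cs.reverse.foldl pkpStepSeq (L, U, [])).2.2.foldl pkpDel
           (List.range cs.length)).map (fun p => cs.getD p ' ') := by
  have h := pkp_main cs cs.reverse L U (List.range cs.length) hL hU
  rwa [pkp_map_range] at h

theorem pkp_zip_filter (cs : List Char) : ∀ (bs : List Bool), bs.length = cs.length →
    ((cs.zip bs).filter (·.2)).map (·.1)
      = (truePos bs).map (fun p => cs.getD p ' ') := by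
  intro bs
  induction bs generalizing cs with
  | nil =>
    intro h
    cases cs with
    | nil => simp [truePos]
    | cons c cs' => simp at h
  | cons b bs ih =>
    intro h
    cases cs with
    | nil => simp at h
    | cons c cs' =>
      simp only [List.length_cons] at h
      by_cases hb : b = true <;>
        simp [truePos, hb, ih cs' (by omega), List.map_map, Function.comp]

theorem pkp_final (cs : List Char) (L U : List Int)
    (hL : ∀ x ∈ L, 0 ≤ x) (hU : ∀ x ∈ U, 0 ≤ x) (hn : cs.length ≠ 0) :
    String.ofList (cs.reverse.foldl pkpStepA (cs, L, U)).1
      = String.ofList (((cs.zip (pkpFlags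
          (((cs.reverse.foldl (pkpStepB L.reverse U.reverse) (0, 0, [])).2.2).foldl
            (fun t idx => if idx < (pkpCnt t : Int) then pkpDelete t idx else t)
            (pkpBuild cs.length)))).filter (·.2)).map (·.1)) := by
  have hseq : (cs.reverse.foldl pkpStepSeq (L, U, [])).2.2
      = (cs.reverse.foldl (pkpStepB L.reverse U.reverse) (0, 0, [])).2.2 := by
    have h := pkp_phase1 L U cs.reverse 0 0 [] (by omega) (by omega)
    simpa using h
  have hnn : ∀ x ∈ (cs.reverse.foldl (pkpStepB L.reverse U.reverse) (0, 0, [])).2.2, 0 ≤ x := by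
    rw [← hseq]
    exact pkp_seq_nonneg cs.reverse L U [] hL hU (by simp)
  obtain ⟨hfl, hwf⟩ := pkp_build_flags cs.length (by omega)
  obtain ⟨htp, _⟩ := pkp_tree_fold _ (pkpBuild cs.length) hwf hnn
  have hlenT : (pkpFlags
      (((cs.reverse.foldl (pkpStepB L.reverse U.reverse) (0, 0, [])).2.2).foldl
        (fun t idx => if idx < (pkpCnt t : Int) then pkpDelete t idx else t)
        (pkpBuild cs.length))).length = cs.length := by
    rw [pkp_fold_flags_length, hfl, List.length_replicate]
  rw [pkp_bridge cs L U hL hU, pkp_zip_filter cs _ hlenT, htp, hfl,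
    pkp_truePos_replicate, hseq]

-- ===== VERDICT (by name: the statement is the Claim_ definition above) =====
theorem process_key_presses_spec : Claim_equal_process_key_presses := by
  intro s _
  unfold Spec_process_key_presses process_key_presses process_key_presses_alt
  dsimp only
  by_cases hn : s.toList.length = 0
  · rw [if_pos hn]
    have h0 : s.toList = [] := List.length_eq_zero_iff.mp hn
    have hs : s = "" := by
      rw [← String.ofList_toList (s := s), h0]
    rw [hs]
    rfl
  · rw [if_neg hn]
    exact pkp_final s.toList _ _
      (pkp_enum_nonneg s.toList PySem.Chars.islower)
      (pkp_enum_nonneg s.toList PySem.Chars.isupper) hn
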